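-- pv_equiv track=rewrite | github.com/fede-oss/relacc-python | test/spec/pipeline/test_pairwise.py | _sample_rows_with_stroke_count
-- ===== SOURCE A (Python) =====
-- def _sample_rows_with_stroke_count(stroke_count: int, offset=0):
--     rows = ["stroke_id x y time is_writing"]
--     time = 0
--     x = 10 + offset
--     for stroke_id in range(stroke_count):
--         rows.append(f"{stroke_id} {x} 20 {time} 1")
--         time += 10
--         x += 2
--         rows.append(f"{stroke_id} {x} 22 {time} 1")
--         time += 10
--         x += 2
--     return rows
-- ===== SOURCE B (Python) =====
-- def _sample_rows_with_stroke_count(stroke_count: int, offset=0):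
--     # One flat pass over half-steps k = 0..2n-1 (two staged passes: field tuples, then
--     # formatting with join): row k has stroke k//2, x = 10+offset+2k, y = 20+2*(k%2), time = 10k.
--     fields = [(k // 2, 10 + offset + 2 * k, 20 + 2 * (k % 2), 10 * k, 1)
--               for k in range(2 * stroke_count)]
--     return ["stroke_id x y time is_writing"] + [" ".join(map(str, t)) for t in fields]
-- ===== Notes on version B (the rewrite author's own statement) =====
-- stated objective: alternative
-- what changed: Replaced the per-stroke loop threading mutable time/x accumulators and appending f-string pairs with two staged passes over a flat half-step index k in range(2*stroke_count): first a table of field tuples (k//2, 10+offset+2k, 20+2*(k%2), 10k, 1), then a formatting pass joining each tuple with ' '.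
import Mathlib
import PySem

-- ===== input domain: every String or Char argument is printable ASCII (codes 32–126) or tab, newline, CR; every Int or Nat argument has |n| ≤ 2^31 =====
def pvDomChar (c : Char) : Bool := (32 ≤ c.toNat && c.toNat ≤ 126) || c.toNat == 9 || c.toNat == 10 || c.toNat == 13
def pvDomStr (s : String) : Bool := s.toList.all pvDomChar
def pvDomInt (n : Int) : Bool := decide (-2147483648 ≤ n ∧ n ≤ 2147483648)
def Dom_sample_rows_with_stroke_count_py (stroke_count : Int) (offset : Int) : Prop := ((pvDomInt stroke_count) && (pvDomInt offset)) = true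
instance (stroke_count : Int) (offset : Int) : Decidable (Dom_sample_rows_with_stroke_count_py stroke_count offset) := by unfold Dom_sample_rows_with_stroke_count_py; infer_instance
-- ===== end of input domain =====

-- B replaces A's per-stroke loop with mutable time/x accumulators by two staged passes over a flat
-- half-step index k in range(2n): a table of field tuples, then a ' '-join formatting pass.

-- ===== PORT A =====
-- literal transliteration: the loop threads state (rows, time, x); two f-string rows per stroke
def sample_rows_with_stroke_count_py (stroke_count : Int) (offset : Int) : List String :=
  let st := (PySem.List.pyRange 0 stroke_count 1).foldl
    (fun (st : List String × Int × Int) stroke_id =>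
      let rows := st.1
      let time := st.2.1
      let x := st.2.2
      let rows := rows ++ [PySem.Int.toStr stroke_id ++ " " ++ PySem.Int.toStr x ++ " 20 " ++ PySem.Int.toStr time ++ " 1"]
      let time := time + 10
      let x := x + 2
      let rows := rows ++ [PySem.Int.toStr stroke_id ++ " " ++ PySem.Int.toStr x ++ " 22 " ++ PySem.Int.toStr time ++ " 1"]
      (rows, time + 10, x + 2))
    (["stroke_id x y time is_writing"], (0 : Int), 10 + offset)
  st.1

-- ===== PORT B =====
-- staged: pass 1 builds the field-tuple table over half-steps k; pass 2 formats each tuple by joining with " "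
def sample_rows_with_stroke_count_py_alt (stroke_count : Int) (offset : Int) : List String :=
  let fields := (PySem.List.pyRange 0 (2 * stroke_count) 1).map
    (fun k => (PySem.Int.floordiv k 2, 10 + offset + 2 * k, 20 + 2 * PySem.Int.mod k 2, 10 * k, (1 : Int)))
  "stroke_id x y time is_writing" ::
    fields.map (fun t => PySem.Str.join " "
      [PySem.Int.toStr t.1, PySem.Int.toStr t.2.1, PySem.Int.toStr t.2.2.1,
       PySem.Int.toStr t.2.2.2.1, PySem.Int.toStr t.2.2.2.2])

-- ===== PRECONDITION & SPEC =====
def Spec_sample_rows_with_stroke_count_py (stroke_count : Int) (offset : Int) (out : List String) : Prop := out = sample_rows_with_stroke_count_py_alt stroke_count offset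
instance (stroke_count : Int) (offset : Int) (out : List String) : Decidable (Spec_sample_rows_with_stroke_count_py stroke_count offset out) := by unfold Spec_sample_rows_with_stroke_count_py; infer_instance

-- ===== CLAIM =====
def Claim_equal_sample_rows_with_stroke_count_py : Prop := ∀ (stroke_count : Int) (offset : Int), Dom_sample_rows_with_stroke_count_py stroke_count offset → Spec_sample_rows_with_stroke_count_py stroke_count offset (sample_rows_with_stroke_count_py stroke_count offset)

-- ===== LEMMAS AND PROOFS =====

-- A's loop body as a named step function
def pvStep (st : List String × Int × Int) (stroke_id : Int) : List String × Int × Int :=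
  let rows := st.1
  let time := st.2.1
  let x := st.2.2
  let rows := rows ++ [PySem.Int.toStr stroke_id ++ " " ++ PySem.Int.toStr x ++ " 20 " ++ PySem.Int.toStr time ++ " 1"]
  let time := time + 10
  let x := x + 2
  let rows := rows ++ [PySem.Int.toStr stroke_id ++ " " ++ PySem.Int.toStr x ++ " 22 " ++ PySem.Int.toStr time ++ " 1"]
  (rows, time + 10, x + 2)

-- B's formatting of half-step k, with the field table already fused in
def pvFmt (offset : Int) (k : Int) : String :=
  PySem.Str.join " "
    [PySem.Int.toStr (PySem.Int.floordiv k 2), PySem.Int.toStr (10 + offset + 2 * k),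
     PySem.Int.toStr (20 + 2 * PySem.Int.mod k 2), PySem.Int.toStr (10 * k), PySem.Int.toStr 1]

theorem pvJoin5 (a b c d e : String) :
    PySem.Str.join " " [a, b, c, d, e] = a ++ " " ++ b ++ " " ++ c ++ " " ++ d ++ " " ++ e := by
  apply String.toList_injective
  simp [PySem.Str.join, PySem.Chars.join_cons_cons, PySem.Chars.join_singleton]

theorem pvFmt_even (offset : Int) (n : ℕ) :
    pvFmt offset (2 * (n : Int)) =
      PySem.Int.toStr (n : Int) ++ " " ++ PySem.Int.toStr (10 + offset + 4 * (n : Int)) ++ " 20 " ++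
        PySem.Int.toStr (20 * (n : Int)) ++ " 1" := by
  unfold pvFmt
  rw [pvJoin5]
  rw [PySem.Int.floordiv_eq_ediv_of_pos (by omega), PySem.Int.mod_eq_emod_of_pos (by omega)]
  have h1 : (2 * (n : Int)) / 2 = (n : Int) := by omega
  have h2 : (2 * (n : Int)) % 2 = 0 := by omega
  rw [h1, h2]
  have e20 : PySem.Int.toStr (20 + 2 * (0 : Int)) = "20" := by decide
  have e1 : PySem.Int.toStr (1 : Int) = "1" := by decide
  rw [e20, e1, show (10 : Int) + offset + 2 * (2 * (n : Int)) = 10 + offset + 4 * (n : Int) by ring,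
      show (10 : Int) * (2 * (n : Int)) = 20 * (n : Int) by ring]
  apply String.toList_injective
  simp

theorem pvFmt_odd (offset : Int) (n : ℕ) :
    pvFmt offset (2 * (n : Int) + 1) =
      PySem.Int.toStr (n : Int) ++ " " ++ PySem.Int.toStr (12 + offset + 4 * (n : Int)) ++ " 22 " ++
        PySem.Int.toStr (20 * (n : Int) + 10) ++ " 1" := by
  unfold pvFmt
  rw [pvJoin5]
  rw [PySem.Int.floordiv_eq_ediv_of_pos (by omega), PySem.Int.mod_eq_emod_of_pos (by omega)]
  have h1 : (2 * (n : Int) + 1) / 2 = (n : Int) := by omega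
  have h2 : (2 * (n : Int) + 1) % 2 = 1 := by omega
  rw [h1, h2]
  have e22 : PySem.Int.toStr (20 + 2 * (1 : Int)) = "22" := by decide
  have e1 : PySem.Int.toStr (1 : Int) = "1" := by decide
  rw [e22, e1, show (10 : Int) + offset + 2 * (2 * (n : Int) + 1) = 12 + offset + 4 * (n : Int) by ring,
      show (10 : Int) * (2 * (n : Int) + 1) = 20 * (n : Int) + 10 by ring]
  apply String.toList_injective
  simp

theorem pvInvariant (offset : Int) (n : ℕ) :
    (PySem.List.pyRange 0 n 1).foldl pvStep (["stroke_id x y time is_writing"], (0 : Int), 10 + offset) =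
      ("stroke_id x y time is_writing" :: (PySem.List.pyRange 0 (2 * (n : Int)) 1).map (pvFmt offset),
        20 * (n : Int), 10 + offset + 4 * (n : Int)) := by
  induction n with
  | zero => simp [PySem.List.pyRange_one_eq_nil]
  | succ n ih =>
      have h1 : ((n : Int) + 1) = ((n + 1 : ℕ) : Int) := by push_cast; ring
      have h := PySem.List.pyRange_one_succ_right (a := 0) (b := (n : Int)) (by exact_mod_cast Int.natCast_nonneg n)
      rw [h1] at h
      have h2 : (2 * ((n + 1 : ℕ) : Int)) = (2 * (n : Int) + 1) + 1 := by push_cast; ring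
      have hr2 : PySem.List.pyRange 0 (2 * ((n + 1 : ℕ) : Int)) 1 =
          PySem.List.pyRange 0 (2 * (n : Int)) 1 ++ [2 * (n : Int)] ++ [2 * (n : Int) + 1] := by
        rw [h2, PySem.List.pyRange_one_succ_right (by omega),
            PySem.List.pyRange_one_succ_right (by omega)]
      rw [h, List.foldl_append, ih, hr2]
      simp only [List.map_append, List.map_cons, List.map_nil, List.foldl_cons, List.foldl_nil]
      rw [pvFmt_even, pvFmt_odd]
      simp [pvStep, Prod.ext_iff]
      refine ⟨?_, by ring, by ring⟩
      rw [show (10 : Int) + offset + 4 * (n : Int) + 2 = 12 + offset + 4 * (n : Int) by ring]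

theorem pvMain (stroke_count offset : Int) :
    sample_rows_with_stroke_count_py stroke_count offset = sample_rows_with_stroke_count_py_alt stroke_count offset := by
  show (List.foldl pvStep (["stroke_id x y time is_writing"], (0 : Int), 10 + offset)
      (PySem.List.pyRange 0 stroke_count 1)).1 =
    "stroke_id x y time is_writing" :: ((PySem.List.pyRange 0 (2 * stroke_count) 1).map _).map _
  rw [List.map_map]
  by_cases h : stroke_count ≤ 0
  · rw [PySem.List.pyRange_one_eq_nil h, PySem.List.pyRange_one_eq_nil (by omega)]; simp
  · have hn : stroke_count = ((stroke_count.toNat : ℕ) : Int) := by omega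
    rw [hn, pvInvariant offset stroke_count.toNat]
    rfl

-- ===== VERDICT =====
theorem sample_rows_with_stroke_count_py_spec : Claim_equal_sample_rows_with_stroke_count_py := by
  intro sc off _
  unfold Spec_sample_rows_with_stroke_count_py
  exact pvMain sc off
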